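-- pv_equiv track=rewrite | github.com/sueszli/vector-database-benchmark | dataset/cpp/python/package-data.py | collect_sdist_files
-- ===== SOURCE A (Python) =====
-- import fnmatch
--
-- def collect_sdist_files(complete_file_list: list[str]) -> list[str]:
--     """Return a list of files which should be present in the sdist."""
--     ignore_patterns = (
--         '.azure-pipelines/*',
--         '.cherry_picker.toml',
--         '.git*',
--         '.mailmap',
--         'changelogs/README.md',
--         'changelogs/config.yaml',
--         'changelogs/fragments/*',
--         'hacking/*',
--     )
--
--     sdist_files = [path for path in complete_file_list if not any(fnmatch.fnmatch(path, ignore) for ignore in ignore_patterns)]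
--
--     egg_info = (
--         'PKG-INFO',
--         'SOURCES.txt',
--         'dependency_links.txt',
--         'entry_points.txt',
--         'not-zip-safe',
--         'requires.txt',
--         'top_level.txt',
--     )
--
--     sdist_files.append('PKG-INFO')
--     sdist_files.extend(f'lib/ansible_core.egg-info/{name}' for name in egg_info)
--
--     return sdist_files
-- ===== SOURCE B (Python) =====
-- def collect_sdist_files(complete_file_list: list[str]) -> list[str]:
--     """Return a list of files which should be present in the sdist."""
--     # Each ignore pattern is either a literal name or a literal prefix followed
--     # by a trailing '*' (which in fnmatch matches anything, '/' included), so
--     # the pattern tests reduce to one set lookup plus one startswith check.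
--     ignore_exact = {
--         '.cherry_picker.toml',
--         '.mailmap',
--         'changelogs/README.md',
--         'changelogs/config.yaml',
--     }
--     ignore_prefixes = (
--         '.azure-pipelines/',
--         '.git',
--         'changelogs/fragments/',
--         'hacking/',
--     )
--
--     sdist_files = [
--         path for path in complete_file_list
--         if path not in ignore_exact and not path.startswith(ignore_prefixes)
--     ]
--
--     egg_info = (
--         'PKG-INFO',
--         'SOURCES.txt',
--         'dependency_links.txt',
--         'entry_points.txt',
--         'not-zip-safe',
--         'requires.txt',
--         'top_level.txt',
--     )
--
--     sdist_files.append('PKG-INFO')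
--     sdist_files.extend(f'lib/ansible_core.egg-info/{name}' for name in egg_info)
--
--     return sdist_files
-- ===== Notes on version B (the rewrite author's own statement) =====
-- stated objective: simpler
-- what changed: B replaces the per-path scan over eight glob patterns by a direct classification of those patterns: the four literal ones become one set lookup and the four trailing-'*' ones one startswith against a prefix tuple, so no pattern-matching engine runs.
import Mathlib
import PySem

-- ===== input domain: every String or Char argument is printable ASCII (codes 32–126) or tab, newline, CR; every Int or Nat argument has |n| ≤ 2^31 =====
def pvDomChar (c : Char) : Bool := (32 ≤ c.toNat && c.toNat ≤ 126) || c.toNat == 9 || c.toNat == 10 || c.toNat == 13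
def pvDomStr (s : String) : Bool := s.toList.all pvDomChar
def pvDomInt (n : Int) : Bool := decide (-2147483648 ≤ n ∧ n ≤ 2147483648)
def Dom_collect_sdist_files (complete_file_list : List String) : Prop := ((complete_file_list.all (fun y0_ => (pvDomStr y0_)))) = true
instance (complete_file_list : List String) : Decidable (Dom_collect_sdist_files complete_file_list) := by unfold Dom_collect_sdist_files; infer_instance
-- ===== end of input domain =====

-- B replaces A's per-path scan over eight glob patterns by a direct classification of those
-- patterns into four exact names (a set lookup) and four literal prefixes (one startswith).

-- ===== PORT A =====
-- Hand port of fnmatch.fnmatch for patterns whose only wildcard is '*' (no '?', '['):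
-- fnmatch translates '*' to '.*' (DOTALL, anchored) and escapes every other character,
-- which is exactly this recursion; exact for the eight literal patterns used here.
def globMatch (s p : List Char) : Bool :=
  match s, p with
  | [], [] => true
  | [], '*' :: ps => globMatch [] ps
  | [], _ :: _ => false
  | _ :: _, [] => false
  | c :: t, '*' :: ps => globMatch (c :: t) ps || globMatch t ('*' :: ps)
  | c :: t, q :: ps => c == q && globMatch t ps
termination_by s.length + p.length

def fnmatch (path pattern : String) : Bool := globMatch path.toList pattern.toList

def collect_sdist_files (complete_file_list : List String) : List String :=
  let ignore_patterns : List String :=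
    [".azure-pipelines/*", ".cherry_picker.toml", ".git*", ".mailmap",
     "changelogs/README.md", "changelogs/config.yaml", "changelogs/fragments/*", "hacking/*"]
  let sdist_files := complete_file_list.filter
    (fun path => ! ignore_patterns.any (fun ignore => fnmatch path ignore))
  let egg_info : List String :=
    ["PKG-INFO", "SOURCES.txt", "dependency_links.txt", "entry_points.txt",
     "not-zip-safe", "requires.txt", "top_level.txt"]
  sdist_files ++ ["PKG-INFO"] ++ egg_info.map (fun name => "lib/ansible_core.egg-info/" ++ name)

-- ===== PORT B =====
def collect_sdist_files_alt (complete_file_list : List String) : List String :=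
  let ignore_exact : PySem.Set String := PySem.Set.ofList
    [".cherry_picker.toml", ".mailmap", "changelogs/README.md", "changelogs/config.yaml"]
  let ignore_prefixes : List String :=
    [".azure-pipelines/", ".git", "changelogs/fragments/", "hacking/"]
  let sdist_files := complete_file_list.filter (fun path =>
    ! ignore_exact.contains path
      && ! ignore_prefixes.any (fun pre => PySem.Str.startswith path pre))
  let egg_info : List String :=
    ["PKG-INFO", "SOURCES.txt", "dependency_links.txt", "entry_points.txt",
     "not-zip-safe", "requires.txt", "top_level.txt"]
  sdist_files ++ ["PKG-INFO"] ++ egg_info.map (fun name => "lib/ansible_core.egg-info/" ++ name)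

-- ===== PRECONDITION & SPEC =====
def Spec_collect_sdist_files (complete_file_list : List String) (out : List String) : Prop := out = collect_sdist_files_alt complete_file_list
instance (complete_file_list : List String) (out : List String) : Decidable (Spec_collect_sdist_files complete_file_list out) := by unfold Spec_collect_sdist_files; infer_instance

-- ===== CLAIM (what is proved, stated in full; the proofs are below) =====
def Claim_equal_collect_sdist_files : Prop := ∀ (complete_file_list : List String), Dom_collect_sdist_files complete_file_list → Spec_collect_sdist_files complete_file_list (collect_sdist_files complete_file_list)

-- ===== LEMMAS AND PROOFS =====

theorem globMatch_star_nil (s : List Char) : globMatch s ['*'] = true := by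
  induction s with
  | nil => simp [globMatch]
  | cons c t ih => simp [globMatch, ih]

-- a pattern without '*' matches exactly itself
theorem globMatch_noStar (p : List Char) (hp : '*' ∉ p) : ∀ s, globMatch s p = (s == p) := by
  induction p with
  | nil => intro s; cases s <;> simp [globMatch]
  | cons q ps ih =>
    intro s
    have hq : q ≠ '*' := fun h => hp (h ▸ List.mem_cons_self)
    have hps : '*' ∉ ps := fun h => hp (List.mem_cons_of_mem _ h)
    cases s with
    | nil => rw [globMatch] <;> simp_all
    | cons c t => rw [globMatch] <;> simp_all [ih hps t]

-- a pattern 'prefix*' (no other '*') matches exactly the strings starting with that prefix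
theorem globMatch_prefixStar (p : List Char) (hp : '*' ∉ p) :
    ∀ s, globMatch s (p ++ ['*']) = p.isPrefixOf s := by
  induction p with
  | nil => intro s; simpa using globMatch_star_nil s
  | cons q ps ih =>
    intro s
    have hq : q ≠ '*' := fun h => hp (h ▸ List.mem_cons_self)
    have hps : '*' ∉ ps := fun h => hp (List.mem_cons_of_mem _ h)
    cases s with
    | nil => rw [List.cons_append, globMatch] <;> simp_all [List.isPrefixOf]
    | cons c t =>
      rw [List.cons_append, globMatch]
      · by_cases h : c = q
        · simp_all [ih hps t, List.isPrefixOf]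
        · have h1 : (c == q) = false := by simp [h]
          have h2 : (q == c) = false := by simp [Ne.symm h]
          simp [h1, List.isPrefixOf, h2]
      · simp_all

theorem toList_beq_iff (s t : String) : (s.toList == t.toList) = (s == t) := by
  simp [String.toList_inj]

-- the eight-pattern test of A, pointwise, equals B's exact-name + prefix test
theorem pred_eq (p : String) :
    (! ([".azure-pipelines/*", ".cherry_picker.toml", ".git*", ".mailmap",
        "changelogs/README.md", "changelogs/config.yaml", "changelogs/fragments/*",
        "hacking/*"] : List String).any (fun ignore => fnmatch p ignore))
      = (! (PySem.Set.ofList [".cherry_picker.toml", ".mailmap", "changelogs/README.md",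
              "changelogs/config.yaml"] : PySem.Set String).contains p
          && ! ([".azure-pipelines/", ".git", "changelogs/fragments/", "hacking/"] :
                List String).any (fun pre => PySem.Str.startswith p pre)) := by
  simp only [List.any_cons, List.any_nil, fnmatch]
  rw [show (".azure-pipelines/*" : String).toList
        = (".azure-pipelines/" : String).toList ++ ['*'] from rfl,
      show (".git*" : String).toList = (".git" : String).toList ++ ['*'] from rfl,
      show ("changelogs/fragments/*" : String).toList
        = ("changelogs/fragments/" : String).toList ++ ['*'] from rfl,
      show ("hacking/*" : String).toList = ("hacking/" : String).toList ++ ['*'] from rfl]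
  rw [globMatch_prefixStar _ (by decide), globMatch_prefixStar _ (by decide),
      globMatch_prefixStar _ (by decide), globMatch_prefixStar _ (by decide),
      globMatch_noStar _ (by decide), globMatch_noStar _ (by decide),
      globMatch_noStar _ (by decide), globMatch_noStar _ (by decide)]
  simp only [toList_beq_iff, PySem.Set.contains, PySem.Set.ofList, PySem.Str.startswith_eq,
    PySem.Chars.startswith]
  rw [Bool.eq_iff_iff]
  simp [List.contains_eq_mem]
  tauto

-- ===== VERDICT (by name: the statement is the Claim_ definition above) =====
theorem collect_sdist_files_spec : Claim_equal_collect_sdist_files := by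
  intro l _
  show collect_sdist_files l = collect_sdist_files_alt l
  simp only [collect_sdist_files, collect_sdist_files_alt]
  rw [List.filter_congr (fun p _ => pred_eq p)]
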